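-- pv_equiv track=rewrite | github.com/KJstudio1171/algorithm | 프로그래머스/n^2_배열_만들기.py | solution
-- ===== SOURCE A (Python) =====
-- def solution(n, left, right):
--     answer = []
--     i_left = left // n
--     j_left = left % n
--     i_right = right // n
--     j_right = right % n
--
--     for i in range(i_left, i_right + 1):
--         for _ in range(i + 1):
--             answer.append(i + 1)
--         for j in range(i + 2, n + 1):
--             answer.append(j)
--     return answer[j_left : j_left + right - left + 1]
-- ===== SOURCE B (Python) =====
-- def solution(n, left, right):
--     return [max(k // n, k % n) + 1 for k in range(left, right + 1)]
-- ===== Notes on version B (the rewrite author's own statement) =====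
-- stated objective: simpler
-- what changed: B replaces A's row-building nested loops plus slice by a single comprehension computing the snail value max(k//n, k%n)+1 directly at each flat index k in [left, right].
-- outside the precondition, e.g. on solution(0, 0, 0): A raises ZeroDivisionError, B raises ZeroDivisionError; on solution(1, 0, 2): A returns [1, 2, 2], B returns [1, 2, 3]; on solution(-6, -15, -13): A returns [], B returns [3, 3, 3]
import Mathlib
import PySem

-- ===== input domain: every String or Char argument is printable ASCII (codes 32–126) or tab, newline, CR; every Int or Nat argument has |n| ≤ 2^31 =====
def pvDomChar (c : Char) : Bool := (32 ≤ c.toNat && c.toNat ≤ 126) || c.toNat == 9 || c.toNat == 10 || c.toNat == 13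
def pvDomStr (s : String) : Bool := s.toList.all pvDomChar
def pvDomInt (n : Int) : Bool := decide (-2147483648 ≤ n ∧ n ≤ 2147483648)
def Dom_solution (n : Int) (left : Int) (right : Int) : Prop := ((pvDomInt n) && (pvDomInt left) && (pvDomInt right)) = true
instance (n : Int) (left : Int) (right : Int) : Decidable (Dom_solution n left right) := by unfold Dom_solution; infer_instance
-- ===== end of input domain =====

-- B computes each snail value max(k//n, k%n)+1 directly at flat index k, replacing A's
-- row-building loops and slice (objective: simpler).

-- ===== PORT A =====
-- Python's list with O(1) .append is ported as Array with push, read back at the slice.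
def solution (n : Int) (left : Int) (right : Int) : List Int :=
  let answer : Array Int := #[]
  let iLeft := PySem.Int.floordiv left n
  let jLeft := PySem.Int.mod left n
  let iRight := PySem.Int.floordiv right n
  let _jRight := PySem.Int.mod right n
  let answer := (PySem.List.pyRange iLeft (iRight + 1)).foldl (fun acc i =>
    let acc := (PySem.List.pyRange 0 (i + 1)).foldl (fun a _ => a.push (i + 1)) acc
    (PySem.List.pyRange (i + 2) (n + 1)).foldl (fun a j => a.push j) acc) answer
  PySem.List.slice answer.toList (some jLeft) (some (jLeft + right - left + 1))

-- ===== PORT B =====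
def solution_alt (n : Int) (left : Int) (right : Int) : List Int :=
  (PySem.List.pyRange left (right + 1)).map
    (fun k => max (PySem.Int.floordiv k n) (PySem.Int.mod k n) + 1)

-- ===== PRECONDITION & SPEC =====
-- Pre_ is the problem's natural domain — an n×n snail array (n ≥ 1) with flat indices in
-- [0, n²) — plus the empty requests on which both programs return []: left > right with
-- n ≥ 1, and with n ≤ -1 when A's rows are all empty.  A raises ZeroDivisionError when
-- n = 0; on the remaining negative or out-of-range inputs A's rows no longer line up with
-- the n×n array and its slice is an accident of the construction, so those inputs are
-- excluded (examples in the claim).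
def Pre_solution (n : Int) (left : Int) (right : Int) : Prop :=
  (1 ≤ n ∧ (right < left ∨ (0 ≤ left ∧ left < n * n ∧ 0 ≤ right ∧ right < n * n))) ∨
  (n ≤ -1 ∧ right < left ∧ left ≤ n * (n - 1) ∧ n + 1 ≤ right)
instance (n : Int) (left : Int) (right : Int) : Decidable (Pre_solution n left right) := by
  unfold Pre_solution; infer_instance

def pvWitness_solution : Int × Int × Int := (3, 2, 5)

def Spec_solution (n : Int) (left : Int) (right : Int) (out : List Int) : Prop :=
  out = solution_alt n left right
instance (n : Int) (left : Int) (right : Int) (out : List Int) : Decidable (Spec_solution n left right out) := by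
  unfold Spec_solution; infer_instance

-- ===== CLAIM (what is proved, stated in full; the proofs are below) =====
def Claim_equal_solution : Prop := ∀ (n : Int) (left : Int) (right : Int),
  Dom_solution n left right → Pre_solution n left right →
  Spec_solution n left right (solution n left right)

-- ===== LEMMAS AND PROOFS =====

-- The snail value at flat index k (B's per-element function).
def pvF (n k : Int) : Int := max (PySem.Int.floordiv k n) (PySem.Int.mod k n) + 1

-- The row A builds for row index i.
def pvRow (n i : Int) : List Int :=
  (PySem.List.pyRange 0 (i + 1)).map (fun _ => i + 1) ++ PySem.List.pyRange (i + 2) (n + 1)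

lemma pvF_eq (n k i : Int) (hn : 0 < n) (h1 : i * n ≤ k) (h2 : k < (i + 1) * n) :
    pvF n k = max i (k - i * n) + 1 := by
  have hd : PySem.Int.floordiv k n = i := (PySem.Int.floordiv_eq_iff_of_pos hn).mpr ⟨h1, h2⟩
  have hm : PySem.Int.mod k n = k - i * n := by
    have := PySem.Int.floordiv_mul_add_mod k n
    rw [hd] at this; omega
  simp [pvF, hd, hm]

-- A's row i holds exactly B's values over the flat indices of row i.
lemma pvRow_eq (n i : Int) (hn : 0 < n) (hi : 0 ≤ i) (hin : i < n) :
    pvRow n i = (PySem.List.pyRange (i * n) ((i + 1) * n)).map (pvF n) := by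
  have hmid1 : i * n ≤ i * n + (i + 1) := by omega
  have hmid2 : i * n + (i + 1) ≤ (i + 1) * n := by nlinarith
  rw [PySem.List.pyRange_one_append (i * n) (i * n + (i + 1)) ((i + 1) * n) hmid1 hmid2,
      List.map_append]
  unfold pvRow
  congr 1
  · have h1 : ∀ k ∈ PySem.List.pyRange (i * n) (i * n + (i + 1)), pvF n k = i + 1 := by
      intro k hk
      rw [PySem.List.mem_pyRange_one] at hk
      rw [pvF_eq n k i hn (by omega) (by nlinarith)]
      omega
    rw [List.map_congr_left h1]
    rw [List.map_const', List.map_const']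
    simp [PySem.List.length_pyRange_one]
  · have h1 : ∀ k ∈ PySem.List.pyRange (i * n + (i + 1)) ((i + 1) * n),
        pvF n k = k - i * n + 1 := by
      intro k hk
      rw [PySem.List.mem_pyRange_one] at hk
      rw [pvF_eq n k i hn (by omega) (by omega)]
      omega
    rw [List.map_congr_left h1]
    rw [PySem.List.pyRange_one (i + 2), PySem.List.pyRange_one (i * n + (i + 1)),
        List.map_map]
    have hlen : (n + 1 - (i + 2)).toNat = ((i + 1) * n - (i * n + (i + 1))).toNat := by
      have : (i + 1) * n = i * n + n := by ring
      omega
    rw [hlen]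
    refine List.map_congr_left fun k _ => ?_
    simp only [Function.comp_apply]
    ring

-- Concatenating A's rows a..b-1 gives B's values over the corresponding flat indices.
lemma pvFlat (n : Int) (hn : 0 < n) :
    ∀ (c : Nat) (a b : Int), b - a = (c : Int) → 0 ≤ a → b ≤ n →
    (PySem.List.pyRange a b).flatMap (pvRow n) =
      (PySem.List.pyRange (a * n) (b * n)).map (pvF n) := by
  intro c
  induction c with
  | zero =>
    intro a b hc _ _
    have hba : b = a := by omega
    subst hba
    simp [PySem.List.pyRange_one_eq_nil le_rfl]
  | succ m ih =>
    intro a b hc ha hb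
    have hab : a < b := by omega
    rw [PySem.List.pyRange_one_cons hab, List.flatMap_cons,
        pvRow_eq n a hn ha (by omega),
        ih (a + 1) b (by omega) (by omega) hb,
        PySem.List.pyRange_one_append (a * n) ((a + 1) * n) (b * n)
          (by nlinarith) (by nlinarith),
        List.map_append]

-- Pushing each element (resp. a constant, length-many times) appends it.
lemma pvPush (l : List Int) (arr : Array Int) :
    (l.foldl (fun a j => a.push j) arr).toList = arr.toList ++ l := by
  simp

lemma pvPushConst (c : Int) (l : List Int) (arr : Array Int) :
    (l.foldl (fun a _ => a.push c) arr).toList = arr.toList ++ l.map (fun _ => c) := by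
  simp

-- A's row loop over an array accumulates the concatenation of its rows.
lemma pvRows (n : Int) (rows : List Int) (arr : Array Int) :
    (rows.foldl (fun acc i =>
      (PySem.List.pyRange (i + 2) (n + 1)).foldl (fun a j => a.push j)
        ((PySem.List.pyRange 0 (i + 1)).foldl (fun a _ => a.push (i + 1)) acc)) arr).toList
      = arr.toList ++ rows.flatMap (pvRow n) := by
  induction rows generalizing arr with
  | nil => simp
  | cons i rows ih =>
    rw [List.foldl_cons, ih, pvPush, pvPushConst, List.flatMap_cons]
    unfold pvRow
    simp [List.append_assoc]

lemma pvDivBounds (n x : Int) (hn : 0 < n) (hx : 0 ≤ x) (hxn : x < n * n) :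
    0 ≤ PySem.Int.floordiv x n ∧ PySem.Int.floordiv x n < n := by
  have h := PySem.Int.floordiv_mul_add_mod x n
  have h0 := PySem.Int.mod_nonneg x hn
  have h1 := PySem.Int.mod_lt x hn
  constructor
  · nlinarith [h, h0, h1]
  · nlinarith [h, h0, h1]

lemma pvClampNonpos (a : Int) (ha : a ≤ 0) : PySem.List.clampIdx 1 a = 0 := by
  unfold PySem.List.clampIdx
  split_ifs <;> omega

-- For n ≤ -1 every row index i with n - 1 ≤ i ≤ -1 yields an empty row.
lemma pvRowNil (n i : Int) (h1 : n - 1 ≤ i) (h2 : i ≤ -1) : pvRow n i = [] := by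
  unfold pvRow
  rw [PySem.List.pyRange_one_eq_nil (by omega : i + 1 ≤ 0),
      PySem.List.pyRange_one_eq_nil (by omega : n + 1 ≤ i + 2)]
  simp

lemma pvRowsNil (n : Int) :
    ∀ (c : Nat) (a b : Int), b - a = (c : Int) → n - 1 ≤ a → b ≤ 0 →
    (PySem.List.pyRange a b).flatMap (pvRow n) = [] := by
  intro c
  induction c with
  | zero =>
    intro a b hc _ _
    have hba : b = a := by omega
    subst hba
    simp [PySem.List.pyRange_one_eq_nil le_rfl]
  | succ m ih =>
    intro a b hc ha hb
    have hab : a < b := by omega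
    rw [PySem.List.pyRange_one_cons hab, List.flatMap_cons,
        pvRowNil n a ha (by omega), List.nil_append]
    exact ih (a + 1) b (by omega) (by omega) hb

theorem pvMain (n l r : Int)
    (hpre : (1 ≤ n ∧ (r < l ∨ (0 ≤ l ∧ l < n * n ∧ 0 ≤ r ∧ r < n * n))) ∨
      (n ≤ -1 ∧ r < l ∧ l ≤ n * (n - 1) ∧ n + 1 ≤ r)) :
    solution n l r = solution_alt n l r := by
  simp only [solution, solution_alt]
  rw [pvRows, Array.toList_empty, List.nil_append]
  set iL := PySem.Int.floordiv l n with hiL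
  set jL := PySem.Int.mod l n with hjL
  set iR := PySem.Int.floordiv r n with hiR
  have hLid : iL * n + jL = l := PySem.Int.floordiv_mul_add_mod l n
  have hRid : iR * n + PySem.Int.mod r n = r := PySem.Int.floordiv_mul_add_mod r n
  rw [← hiL, ← hjL, ← hiR] at *
  rcases hpre with ⟨hn1, hpos⟩ | ⟨hn1, hrl, hlb, hrb⟩
  swap
  · -- n ≤ -1: empty request over all-empty rows; both sides are []
    have hnneg : n < 0 := by omega
    obtain ⟨hjl1', hjl2'⟩ := PySem.Int.mod_neg_bounds l hnneg
    obtain ⟨hjr1, hjr2⟩ := PySem.Int.mod_neg_bounds r hnneg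
    have hjl1 : n < jL := hjl1'
    have hjl2 : jL ≤ 0 := hjl2'
    have hiLlb : n - 1 ≤ iL := by nlinarith [hLid, hjl1, hjl2]
    have hiRub : iR ≤ 0 := by nlinarith [hRid, hjr1, hjr2]
    rw [PySem.List.pyRange_one_eq_nil (by omega : r + 1 ≤ l), List.map_nil]
    by_cases hcase : iL ≤ iR ∧ iR = 0
    · obtain ⟨hle, h0⟩ := hcase
      rw [h0]
      rw [PySem.List.pyRange_one_append iL 0 (0 + 1) (by omega) (by omega),
          List.flatMap_append,
          pvRowsNil n (0 - iL).toNat iL 0 (by omega) (by omega) le_rfl,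
          PySem.List.pyRange_one_singleton, List.flatMap_cons, List.flatMap_nil,
          List.nil_append, List.append_nil]
      have hrow0 : pvRow n 0 = [1] := by
        unfold pvRow
        rw [PySem.List.pyRange_one_eq_nil (by omega : n + 1 ≤ 0 + 2),
            PySem.List.pyRange_one_singleton]
        simp
      rw [hrow0]
      apply List.eq_nil_of_length_eq_zero
      rw [PySem.List.length_slice]
      simp only [List.length_cons, List.length_nil]
      rw [pvClampNonpos (jL + r - l + 1) (by omega), pvClampNonpos jL (by omega)]
    · have hans : (PySem.List.pyRange iL (iR + 1)).flatMap (pvRow n) = [] := by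
        by_cases hle : iL ≤ iR
        · have h0 : iR ≤ -1 := by
            rcases (by omega : iR ≤ -1 ∨ iR = 0) with h | h
            · exact h
            · exact absurd ⟨hle, h⟩ hcase
          exact pvRowsNil n (iR + 1 - iL).toNat iL (iR + 1) (by omega) (by omega)
            (by omega)
        · rw [PySem.List.pyRange_one_eq_nil (by omega), List.flatMap_nil]
      rw [hans]
      apply List.eq_nil_of_length_eq_zero
      rw [PySem.List.length_slice]
      have h1 := PySem.List.clampIdx_le 0 (jL + r - l + 1)
      have h2 := PySem.List.clampIdx_le 0 jL
      simp only [List.length_nil]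
      omega
  have hn : 0 < n := by omega
  have hjl0 : 0 ≤ jL := PySem.Int.mod_nonneg l hn
  have hjln : jL < n := PySem.Int.mod_lt l hn
  have hjr0 : 0 ≤ PySem.Int.mod r n := PySem.Int.mod_nonneg r hn
  have hjrn : PySem.Int.mod r n < n := PySem.Int.mod_lt r hn
  rcases hpos with hrl | ⟨hl, hl2, hr, hr2⟩
  · -- empty request left > right: both sides are []
    have hiLR : iR ≤ iL := by
      show PySem.Int.floordiv r n ≤ PySem.Int.floordiv l n
      rw [PySem.Int.floordiv_eq_ediv_of_pos hn, PySem.Int.floordiv_eq_ediv_of_pos hn]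
      exact Int.ediv_le_ediv hn (by omega)
    rw [PySem.List.pyRange_one_eq_nil (by omega : r + 1 ≤ l), List.map_nil]
    by_cases heq : iL = iR
    · have hstop : jL + r - l + 1 = PySem.Int.mod r n + 1 := by
        rw [heq] at hLid; omega
      rw [PySem.List.slice_toNat _ hjl0 (by omega)]
      have h0 : (jL + r - l + 1).toNat - jL.toNat = 0 := by omega
      rw [h0, List.take_zero]
    · have hempty : PySem.List.pyRange iL (iR + 1) = [] :=
        PySem.List.pyRange_one_eq_nil (by omega)
      rw [hempty, List.flatMap_nil]
      apply List.eq_nil_of_length_eq_zero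
      rw [PySem.List.length_slice]
      have h1 := PySem.List.clampIdx_le 0 (jL + r - l + 1)
      have h2 := PySem.List.clampIdx_le 0 jL
      simp only [List.length_nil]
      omega
  obtain ⟨hiL0, hiLn⟩ := pvDivBounds n l hn hl hl2
  obtain ⟨hiR0, hiRn⟩ := pvDivBounds n r hn hr hr2
  by_cases hcase : iL ≤ iR
  · rw [pvFlat n hn (iR + 1 - iL).toNat iL (iR + 1) (by omega) hiL0 (by omega)]
    have hstop0 : 0 ≤ jL + r - l + 1 := by nlinarith
    rw [PySem.List.slice_toNat _ hjl0 hstop0]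
    have hsplit1 : PySem.List.pyRange (iL * n) ((iR + 1) * n)
        = PySem.List.pyRange (iL * n) l ++ PySem.List.pyRange l ((iR + 1) * n) := by
      apply PySem.List.pyRange_one_append <;> nlinarith
    rw [hsplit1, List.map_append]
    have hlen1 : ((PySem.List.pyRange (iL * n) l).map (pvF n)).length = jL.toNat := by
      simp [PySem.List.length_pyRange_one]; omega
    rw [← hlen1, List.drop_left]
    have htake : (jL + r - l + 1).toNat - (List.map (pvF n) (PySem.List.pyRange (iL * n) l)).length
        = (r - l + 1).toNat := by rw [hlen1]; omega
    rw [htake]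
    by_cases hlr : l ≤ r
    · have hsplit2 : PySem.List.pyRange l ((iR + 1) * n)
          = PySem.List.pyRange l (r + 1) ++ PySem.List.pyRange (r + 1) ((iR + 1) * n) := by
        apply PySem.List.pyRange_one_append <;> nlinarith
      rw [hsplit2, List.map_append]
      have hlen2 : ((PySem.List.pyRange l (r + 1)).map (pvF n)).length = (r - l + 1).toNat := by
        simp [PySem.List.length_pyRange_one]; omega
      rw [← hlen2, List.take_left]
      simp [pvF]
    · have : (r - l + 1).toNat = 0 := by omega
      rw [this, List.take_zero]
      rw [PySem.List.pyRange_one_eq_nil (by omega : r + 1 ≤ l)]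
      simp
  · have hempty : PySem.List.pyRange iL (iR + 1) = [] :=
      PySem.List.pyRange_one_eq_nil (by omega)
    rw [hempty, List.flatMap_nil]
    have hrl : r + 1 ≤ l := by nlinarith
    rw [PySem.List.pyRange_one_eq_nil hrl, List.map_nil]
    apply List.eq_nil_of_length_eq_zero
    rw [PySem.List.length_slice]
    have h1 := PySem.List.clampIdx_le 0 (jL + r - l + 1)
    have h2 := PySem.List.clampIdx_le 0 jL
    simp only [List.length_nil]
    omega

-- ===== VERDICT (by name: the statement is the Claim_ definition above) =====
theorem solution_spec : Claim_equal_solution := by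
  intro n l r _ hpre
  exact pvMain n l r hpre
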